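-- pv_equiv track=rewrite | github.com/tanhoang0710/python-practise | TongLienTiep.py | dem
-- ===== SOURCE A (Python) =====
-- import math
--
-- def dem(n):
--     n=n*2
--     m=int(math.sqrt(n))
--     d=0
--     y=0
--     for x in range(2,m+1,1):
--         if n%x==0:
--             y=int(n/x)
--             if ((y-x)%2!=0):
--                 d+=1
--     return d
-- ===== SOURCE B (Python) =====
-- def dem(n):
--     # number of ways to split 2n into a factor pair with odd difference
--     # = (number of divisors of the odd part of n) - 1
--     if n <= 0:
--         return 0
--     m = n
--     while m % 2 == 0:
--         m //= 2
--     c = 0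
--     i = 1
--     while i * i <= m:
--         if m % i == 0:
--             c += 1 if i * i == m else 2
--         i += 1
--     return c - 1
-- ===== Notes on version B (the rewrite author's own statement) =====
-- stated objective: alternative
-- what changed: A scans all candidate factors x of 2n up to sqrt(2n) and counts factor pairs with odd difference; B instead uses the closed form 'count = (number of divisors of the odd part of n) - 1', stripping factors of 2 from n and counting divisors of the odd remainder.
import Mathlib
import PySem

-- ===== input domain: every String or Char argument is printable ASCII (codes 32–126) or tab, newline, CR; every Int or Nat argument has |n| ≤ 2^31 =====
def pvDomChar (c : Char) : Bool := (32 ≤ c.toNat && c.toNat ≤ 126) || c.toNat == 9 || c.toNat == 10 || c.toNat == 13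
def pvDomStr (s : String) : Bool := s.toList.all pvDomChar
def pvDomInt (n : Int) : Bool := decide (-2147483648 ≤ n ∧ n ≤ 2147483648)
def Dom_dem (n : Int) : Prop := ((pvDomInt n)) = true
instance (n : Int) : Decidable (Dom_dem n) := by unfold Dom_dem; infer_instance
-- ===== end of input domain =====

-- B replaces A's scan over factor pairs of 2n by the closed form "(divisors of the odd part of n) - 1";
-- equivalence of return values is proved for all n ≥ 0 (A raises ValueError for n < 0, excluded by Pre_).


-- ===== PORT A =====
-- int(math.sqrt(t)) is ported as Nat.sqrt (exact on Dom: for 0 ≤ t ≤ 2^32 the float sqrt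
-- truncates to the integer square root); int(n/x) in the x∣n branch is ported as floor division
-- (exact there: the quotient is an integer below 2^32, representable in a float).
-- The loop threads the state (d, y) exactly as A does.
def dem (n : Int) : Int :=
  let n2 := n * 2
  let m : Int := (Nat.sqrt n2.toNat : Int)
  let r := (PySem.List.pyRange 2 (m + 1) 1).foldl
    (fun (s : Int × Int) x =>
      if PySem.Int.mod n2 x = 0 then
        let y := PySem.Int.floordiv n2 x
        if PySem.Int.mod (y - x) 2 ≠ 0 then (s.1 + 1, y) else (s.1, y)
      else s) (0, 0)
  r.1

-- ===== PORT B =====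
-- while m % 2 == 0: m //= 2   (run on Nat; B only reaches it with m > 0, and the 0 < m
-- guard only serves Lean's termination — Python's loop is identical on positive m)
def oddPartRec (m : Nat) : Nat :=
  if _h : m % 2 = 0 ∧ 0 < m then oddPartRec (m / 2) else m
termination_by m
decreasing_by omega

-- while i*i <= m: if m % i == 0: c += 1 if i*i == m else 2; i += 1   (accumulator written as
-- structural recursion on the remaining interval, same additions in the same order)
def divCountFrom (m i c : Nat) : Nat :=
  if _h : i * i ≤ m then
    divCountFrom m (i + 1) (c + (if m % i = 0 then (if i * i = m then 1 else 2) else 0))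
  else c
termination_by m + 1 - i
decreasing_by
  rcases Nat.eq_zero_or_pos i with h | h
  · omega
  · have := Nat.le_mul_of_pos_left i h; omega

def dem_alt (n : Int) : Int :=
  if n ≤ 0 then 0
  else (divCountFrom (oddPartRec n.toNat) 1 0 : Int) - 1

-- ===== PRECONDITION & SPEC =====
-- Pre_ excludes exactly n < 0, where A raises ValueError (math.sqrt of a negative number).
def Pre_dem (n : Int) : Prop := 0 ≤ n
instance (n : Int) : Decidable (Pre_dem n) := by unfold Pre_dem; infer_instance
def pvWitness_dem : Int := 6

def Spec_dem (n : Int) (out : Int) : Prop := out = dem_alt n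
instance (n : Int) (out : Int) : Decidable (Spec_dem n out) := by unfold Spec_dem; infer_instance

-- ===== CLAIM (what is proved, stated in full; the proofs are below) =====
def Claim_equal_dem : Prop := ∀ (n : Int), Dom_dem n → Pre_dem n → Spec_dem n (dem n)

-- ===== LEMMAS AND PROOFS =====

def pvOD (N : Nat) : Finset Nat := (Nat.divisors N).filter (fun d => d % 2 = 1)

theorem lemOP_pos : ∀ (N : Nat), 0 < N → 0 < oddPartRec N := by
  intro N
  induction N using oddPartRec.induct with
  | case1 m h ih => rw [oddPartRec, dif_pos h]; intro _; exact ih (by omega)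
  | case2 m h => rw [oddPartRec, dif_neg h]; exact id

theorem odd_dvd_iff (d k : Nat) (hd : d % 2 = 1) : d ∣ 2 * k ↔ d ∣ k := by
  constructor
  · intro h
    have hc : Nat.Coprime d 2 := Nat.coprime_two_right.mpr (Nat.odd_iff.mpr hd)
    exact hc.dvd_of_dvd_mul_left h
  · exact fun h => h.mul_left 2

theorem lemOP : ∀ (N : Nat), 0 < N → Nat.divisors (oddPartRec N) = pvOD N := by
  intro N
  induction N using oddPartRec.induct with
  | case1 m h ih =>
    rw [oddPartRec, dif_pos h]
    intro hm
    rw [ih (by omega)]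
    unfold pvOD
    ext d
    simp only [Finset.mem_filter, Nat.mem_divisors]
    have h2 : m = 2 * (m / 2) := by omega
    constructor
    · rintro ⟨⟨hd, _⟩, hodd⟩
      exact ⟨⟨by rw [h2]; exact hd.mul_left 2, by omega⟩, hodd⟩
    · rintro ⟨⟨hd, _⟩, hodd⟩
      refine ⟨⟨?_, by omega⟩, hodd⟩
      rw [h2] at hd
      exact (odd_dvd_iff d (m/2) hodd).mp hd
  | case2 m h =>
    rw [oddPartRec, dif_neg h]
    intro hm
    unfold pvOD
    symm
    rw [Finset.filter_eq_self]
    intro d hd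
    rw [Nat.mem_divisors] at hd
    have hodd : m % 2 = 1 := by omega
    rcases hd.1 with ⟨c, hc⟩
    -- a divisor of an odd number is odd
    rcases Nat.even_or_odd d with he | ho
    · exfalso
      have : Even m := hc ▸ he.mul_right c
      rw [Nat.even_iff] at this; omega
    · rw [Nat.odd_iff] at ho; omega

def pvDS (m i : Nat) : Finset Nat := (Nat.divisors m).filter (fun d => i ≤ d ∧ i ≤ m / d)

theorem lemDC_inv : ∀ (m i c : Nat), 0 < m → 0 < i → divCountFrom m i c = c + (pvDS m i).card := by
  intro m i c hm
  induction i, c using divCountFrom.induct (m := m) with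
  | case2 i c hii =>
    intro hi
    rw [divCountFrom, dif_neg hii]
    have hz : pvDS m i = ∅ := by
      unfold pvDS
      rw [Finset.filter_eq_empty_iff]
      intro d hd
      rw [Nat.mem_divisors] at hd
      have hdm : d * (m / d) = m := Nat.mul_div_cancel' hd.1
      rintro ⟨h1, h2⟩
      exact hii (le_trans (Nat.mul_le_mul h1 h2) (le_of_eq hdm))
    rw [hz, Finset.card_empty]
    omega
  | case1 i c hii ih =>
    intro hi
    rw [divCountFrom, dif_pos hii]
    simp only [dite_eq_ite] at ih
    rw [ih (by omega)]
    have h1 : (pvDS m i).filter (fun d => i + 1 ≤ d ∧ i + 1 ≤ m / d) = pvDS m (i + 1) := by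
      unfold pvDS
      rw [Finset.filter_filter]
      apply Finset.filter_congr
      intro d _
      omega
    -- the dropped part
    set E := (pvDS m i).filter (fun d => ¬ (i + 1 ≤ d ∧ i + 1 ≤ m / d)) with hE
    -- split pvDS m i by the predicate of pvDS m (i+1)
    have hsplit : (pvDS m (i + 1)).card + E.card = (pvDS m i).card := by
      rw [← h1, hE]
      exact Finset.card_filter_add_card_filter_not (s := pvDS m i) _
    have hmem : ∀ d, d ∈ E ↔ (d ∣ m ∧ (i ≤ d ∧ i ≤ m / d) ∧ (d = i ∨ m / d = i)) := by
      intro d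
      rw [hE]
      unfold pvDS
      simp only [Finset.mem_filter, Nat.mem_divisors]
      constructor
      · rintro ⟨⟨⟨hd, _⟩, hle⟩, hneg⟩
        exact ⟨hd, hle, by omega⟩
      · rintro ⟨hd, hle, heq⟩
        exact ⟨⟨⟨hd, by omega⟩, hle⟩, by omega⟩
    have hcard : E.card = (if m % i = 0 then (if i * i = m then 1 else 2) else 0) := by
      by_cases hmod : m % i = 0
      · have hdvd : i ∣ m := Nat.dvd_of_mod_eq_zero hmod
        have him : i * (m / i) = m := Nat.mul_div_cancel' hdvd
        have hile : i ≤ m / i := by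
          rw [Nat.le_div_iff_mul_le hi]; exact hii
        by_cases hsq : i * i = m
        · have hmi : m / i = i := by
            have : i * (m / i) = i * i := by rw [him, hsq]
            exact (Nat.eq_of_mul_eq_mul_left hi this)
          rw [if_pos hmod, if_pos hsq]
          have : E = {i} := by
            ext d
            rw [hmem, Finset.mem_singleton]
            constructor
            · rintro ⟨hd, ⟨hid, hidv⟩, heq | heq⟩
              · exact heq
              · have hdm : d * (m / d) = m := Nat.mul_div_cancel' hd
                rw [heq] at hdm
                have : d * i = i * i := by rw [hdm, hsq]
                have := Nat.eq_of_mul_eq_mul_right hi this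
                omega
            · rintro rfl
              exact ⟨hdvd, ⟨le_refl _, hile⟩, Or.inl rfl⟩
          rw [this, Finset.card_singleton]
        · have hlt : i < m / i := by
            rcases Nat.lt_or_ge i (m / i) with h | h
            · exact h
            · exfalso
              have hmi : m / i = i := le_antisymm h hile
              rw [hmi] at him
              exact hsq him
          rw [if_pos hmod, if_neg hsq]
          have : E = {i, m / i} := by
            ext d
            rw [hmem, Finset.mem_insert, Finset.mem_singleton]
            constructor
            · rintro ⟨hd, ⟨hid, hidv⟩, heq | heq⟩
              · exact Or.inl heq
              · right
                have hdm : d * (m / d) = m := Nat.mul_div_cancel' hd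
                rw [heq] at hdm
                rw [← him, Nat.mul_comm d i] at hdm
                exact Nat.eq_of_mul_eq_mul_left hi hdm
            · rintro (rfl | rfl)
              · refine ⟨hdvd, ⟨le_refl _, hile⟩, Or.inl rfl⟩
              · refine ⟨Nat.div_dvd_of_dvd hdvd, ⟨by omega, ?_⟩, Or.inr ?_⟩
                · have : m / (m / i) = i := Nat.div_div_self hdvd (by omega)
                  omega
                · exact Nat.div_div_self hdvd (by omega)
          rw [this]
          rw [Finset.card_insert_of_notMem (by rw [Finset.mem_singleton]; omega),
            Finset.card_singleton]
      · rw [if_neg hmod]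
        rw [Finset.card_eq_zero, Finset.eq_empty_iff_forall_notMem]
        intro d hd
        rw [hmem] at hd
        apply hmod
        rcases hd with ⟨hd, _, heq | heq⟩
        · subst heq; exact Nat.mod_eq_zero_of_dvd hd
        · have hdm : d * (m / d) = m := Nat.mul_div_cancel' hd
          rw [heq] at hdm
          exact Nat.mod_eq_zero_of_dvd ⟨d, by rw [← hdm]; ring⟩
    omega

theorem lemDC : ∀ (m : Nat), 0 < m → divCountFrom m 1 0 = (Nat.divisors m).card := by
  intro m hm
  rw [lemDC_inv m 1 0 hm Nat.one_pos, Nat.zero_add]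
  unfold pvDS
  congr 1
  rw [Finset.filter_eq_self]
  intro d hd
  rw [Nat.mem_divisors] at hd
  have hdpos : 0 < d := Nat.pos_of_dvd_of_pos hd.1 hm
  have : 0 < m / d := Nat.div_pos (Nat.le_of_dvd hm hd.1) hdpos
  omega

def pvSA (t : Nat) : Finset Nat :=
  (Finset.Icc 2 (Nat.sqrt t)).filter (fun x => x ∣ t ∧ (t / x + x) % 2 = 1)

theorem foldA (t : Int) : ∀ (l : List Int) (d y : Int),
    ((l.foldl (fun (s : Int × Int) x =>
      if PySem.Int.mod t x = 0 then
        let y := PySem.Int.floordiv t x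
        if PySem.Int.mod (y - x) 2 ≠ 0 then (s.1 + 1, y) else (s.1, y)
      else s) (d, y)).1 : Int)
    = d + ((l.filter (fun x => decide (PySem.Int.mod t x = 0 ∧
        PySem.Int.mod (PySem.Int.floordiv t x - x) 2 ≠ 0))).length : Int) := by
  intro l
  induction l with
  | nil => intro d y; simp
  | cons a l ih =>
    intro d y
    simp only [List.foldl_cons, List.filter_cons, decide_eq_true_eq]
    by_cases h1 : PySem.Int.mod t a = 0
    · by_cases h2 : PySem.Int.mod (PySem.Int.floordiv t a - a) 2 ≠ 0
      · rw [if_pos h1, if_pos h2, if_pos (show _ ∧ _ from ⟨h1, h2⟩), ih, List.length_cons]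
        push_cast; ring
      · rw [if_pos h1, if_neg h2, if_neg (fun hc => h2 hc.2), ih]
    · rw [if_neg h1, if_neg (fun hc => h1 hc.1), ih]

theorem bridgeP (t x : Nat) :
    (PySem.Int.mod (t : Int) (x : Int) = 0 ∧
      PySem.Int.mod (PySem.Int.floordiv (t : Int) (x : Int) - (x : Int)) 2 ≠ 0) ↔
      (x ∣ t ∧ (t / x + x) % 2 = 1) := by
  rw [PySem.Int.mod_eq_zero_iff_dvd, Int.natCast_dvd_natCast]
  have hfd : PySem.Int.floordiv (t : Int) (x : Int) = ((t / x : Nat) : Int) :=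
    PySem.Int.floordiv_natCast t x
  rw [hfd, PySem.Int.mod_eq_emod_of_pos (by omega : (0:Int) < 2)]
  constructor
  · rintro ⟨h1, h2⟩; exact ⟨h1, by omega⟩
  · rintro ⟨h1, h2⟩; exact ⟨h1, by omega⟩

theorem countIcc (t : Nat) : ∀ (s : Nat),
    (((PySem.List.pyRange 2 ((s : Int) + 1) 1).filter (fun x => decide (PySem.Int.mod (t : Int) x = 0 ∧
        PySem.Int.mod (PySem.Int.floordiv (t : Int) x - x) 2 ≠ 0))).length)
    = ((Finset.Icc 2 s).filter (fun x => x ∣ t ∧ (t / x + x) % 2 = 1)).card := by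
  intro s
  induction s with
  | zero =>
    rw [PySem.List.pyRange_one_eq_nil (by omega)]
    rw [show Finset.Icc 2 0 = ∅ from Finset.Icc_eq_empty (by omega)]
    simp
  | succ s ih =>
    rcases Nat.eq_zero_or_pos s with rfl | hs
    · rw [PySem.List.pyRange_one_eq_nil (by omega)]
      rw [show Finset.Icc 2 1 = ∅ from Finset.Icc_eq_empty (by omega)]
      simp
    · have hsplit : PySem.List.pyRange 2 ((s : Int) + 1 + 1) 1
          = PySem.List.pyRange 2 ((s : Int) + 1) 1 ++ [(s : Int) + 1] := by
        have := PySem.List.pyRange_one_succ_right (a := 2) (b := (s : Int) + 1) (by omega)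
        simpa using this
      rw [show (((s + 1 : Nat) : Int) + 1) = ((s : Int) + 1 + 1) by push_cast; ring, hsplit]
      rw [List.filter_append, List.length_append, ih]
      have hins : Finset.Icc 2 (s + 1) = insert (s + 1) (Finset.Icc 2 s) := by
        ext a; simp only [Finset.mem_Icc, Finset.mem_insert]; omega
      rw [hins, Finset.filter_insert]
      have hcast : ((s : Int) + 1) = (((s + 1 : Nat)) : Int) := by push_cast; ring
      by_cases hp : (s + 1) ∣ t ∧ (t / (s + 1) + (s + 1)) % 2 = 1
      · rw [if_pos hp]
        rw [Finset.card_insert_of_notMem (by simp [Finset.mem_Icc])]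
        have : (List.filter (fun x => decide (PySem.Int.mod (t : Int) x = 0 ∧
            PySem.Int.mod (PySem.Int.floordiv (t : Int) x - x) 2 ≠ 0)) [(s : Int) + 1]).length = 1 := by
          simp only [List.filter]
          rw [hcast]
          rw [decide_eq_true ((bridgeP t (s + 1)).mpr hp)]
          simp
        omega
      · rw [if_neg hp]
        have : (List.filter (fun x => decide (PySem.Int.mod (t : Int) x = 0 ∧
            PySem.Int.mod (PySem.Int.floordiv (t : Int) x - x) 2 ≠ 0)) [(s : Int) + 1]).length = 0 := by
          simp only [List.filter]
          rw [hcast]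
          rw [decide_eq_false (fun hc => hp ((bridgeP t (s + 1)).mp hc))]
          simp
        omega

theorem lemA : ∀ (N : Nat), 0 < N → dem (N : Int) = ((pvSA (2 * N)).card : Int) := by
  intro N hN
  unfold dem
  simp only []
  have h2 : ((N : Int) * 2).toNat = 2 * N := by omega
  rw [h2]
  rw [foldA ((N : Int) * 2)]
  have hc : ((N : Int) * 2) = (((2 * N : Nat)) : Int) := by push_cast; ring
  rw [hc]
  rw [countIcc (2 * N) (Nat.sqrt (2 * N))]
  unfold pvSA
  omega

-- facts about a member of pvSA (2N)
theorem memSA (N x : Nat) (hx : x ∈ pvSA (2 * N)) :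
    2 ≤ x ∧ x ∣ 2 * N ∧ (2 * N / x + x) % 2 = 1 ∧ x * (2 * N / x) = 2 * N ∧ x < 2 * N / x := by
  unfold pvSA at hx
  rw [Finset.mem_filter, Finset.mem_Icc] at hx
  obtain ⟨⟨hx2, hxs⟩, hdvd, hpar⟩ := hx
  have hxx : x * x ≤ 2 * N := Nat.le_sqrt.mp hxs
  have hdm : x * (2 * N / x) = 2 * N := Nat.mul_div_cancel' hdvd
  have hne : x * x ≠ 2 * N := by
    intro he
    have : 2 * N / x = x := by
      have := hdm.trans he.symm
      exact Nat.eq_of_mul_eq_mul_left (by omega) this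
    omega
  have hlt : x < 2 * N / x := by
    rcases Nat.lt_or_ge x (2 * N / x) with h | h
    · exact h
    · exfalso
      have : x * (2 * N / x) ≤ x * x := Nat.mul_le_mul_left x h
      omega
  exact ⟨hx2, hdvd, hpar, hdm, hlt⟩

theorem lemBij : ∀ (N : Nat), 0 < N → (pvSA (2 * N)).card + 1 = (pvOD N).card := by
  intro N hN
  have h1mem : (1 : Nat) ∈ pvOD N := by
    unfold pvOD
    rw [Finset.mem_filter, Nat.mem_divisors]
    exact ⟨⟨Nat.one_dvd _, by omega⟩, rfl⟩
  have hcard : (pvSA (2 * N)).card = ((pvOD N).erase 1).card := by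
    apply Finset.card_bij (fun x _ => if x % 2 = 1 then x else 2 * N / x)
    · -- maps into
      intro x hx
      obtain ⟨hx2, hdvd, hpar, hdm, hlt⟩ := memSA N x hx
      rw [Finset.mem_erase]
      unfold pvOD
      rw [Finset.mem_filter, Nat.mem_divisors]
      by_cases hodd : x % 2 = 1
      · rw [if_pos hodd]
        exact ⟨by omega, ⟨(odd_dvd_iff x N hodd).mp hdvd, by omega⟩, hodd⟩
      · rw [if_neg hodd]
        have hqodd : 2 * N / x % 2 = 1 := by omega
        refine ⟨by omega, ⟨(odd_dvd_iff _ N hqodd).mp (Nat.div_dvd_of_dvd hdvd), by omega⟩, hqodd⟩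
    · -- injective
      intro x1 hx1 x2 hx2 heq
      obtain ⟨ha2, hadvd, hapar, hadm, halt⟩ := memSA N x1 hx1
      obtain ⟨hb2, hbdvd, hbpar, hbdm, hblt⟩ := memSA N x2 hx2
      by_cases h1 : x1 % 2 = 1 <;> by_cases h2 : x2 % 2 = 1
      · rwa [if_pos h1, if_pos h2] at heq
      · exfalso
        rw [if_pos h1, if_neg h2] at heq
        -- x1 = 2N/x2, so x1 * x2 = 2N, so 2N/x1 = x2
        have hprod : x1 * x2 = 2 * N := by rw [heq, Nat.mul_comm]; exact hbdm
        have : 2 * N / x1 = x2 := by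
          rw [← hprod]
          exact Nat.mul_div_cancel_left x2 (by omega)
        omega
      · exfalso
        rw [if_neg h1, if_pos h2] at heq
        have hprod : x2 * x1 = 2 * N := by rw [← heq, Nat.mul_comm]; exact hadm
        have : 2 * N / x2 = x1 := by
          rw [← hprod]
          exact Nat.mul_div_cancel_left x1 (by omega)
        omega
      · rw [if_neg h1, if_neg h2] at heq
        have : x1 * (2 * N / x1) = x2 * (2 * N / x1) := by
          rw [hadm, heq]; exact hbdm.symm
        exact Nat.eq_of_mul_eq_mul_right (by omega) this
    · -- surjective
      intro d hd
      rw [Finset.mem_erase] at hd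
      obtain ⟨hd1, hdod⟩ := hd
      unfold pvOD at hdod
      rw [Finset.mem_filter, Nat.mem_divisors] at hdod
      obtain ⟨⟨hdN, _⟩, hdodd⟩ := hdod
      have hd0 : 0 < d := Nat.pos_of_dvd_of_pos hdN hN
      have hd3 : 3 ≤ d := by omega
      have hdt : d ∣ 2 * N := hdN.mul_left 2
      have hq : 2 * N / d = 2 * (N / d) := Nat.mul_div_assoc 2 hdN
      have hNd : 0 < N / d := Nat.div_pos (Nat.le_of_dvd hN hdN) hd0
      have hdm : d * (2 * N / d) = 2 * N := Nat.mul_div_cancel' hdt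
      by_cases hds : d * d ≤ 2 * N
      · refine ⟨d, ?_, by rw [if_pos hdodd]⟩
        unfold pvSA
        rw [Finset.mem_filter, Finset.mem_Icc]
        exact ⟨⟨by omega, Nat.le_sqrt.mpr hds⟩, hdt, by omega⟩
      · refine ⟨2 * N / d, ?_, ?_⟩
        · unfold pvSA
          rw [Finset.mem_filter, Finset.mem_Icc]
          have hlt : 2 * N / d < d := by
            rcases Nat.lt_or_ge (2 * N / d) d with h | h
            · exact h
            · exfalso
              have : d * d ≤ d * (2 * N / d) := Nat.mul_le_mul_left d h
              omega
          have hxx : (2 * N / d) * (2 * N / d) ≤ 2 * N := by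
            calc (2 * N / d) * (2 * N / d) ≤ (2 * N / d) * d := Nat.mul_le_mul_left _ (by omega)
            _ = 2 * N := by rw [Nat.mul_comm]; exact hdm
          have hdd : 2 * N / (2 * N / d) = d := Nat.div_div_self hdt (by omega)
          exact ⟨⟨by omega, Nat.le_sqrt.mpr hxx⟩, Nat.div_dvd_of_dvd hdt, by omega⟩
        · have hdd : 2 * N / (2 * N / d) = d := Nat.div_div_self hdt (by omega)
          rw [if_neg (by omega), hdd]
  have hpos : 0 < (pvOD N).card := Finset.card_pos.mpr ⟨1, h1mem⟩
  rw [hcard, Finset.card_erase_of_mem h1mem]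
  omega

-- ===== VERDICT (by name: the statement is the Claim_ definition above) =====
theorem dem_spec : Claim_equal_dem := by
  intro n _ hpre
  unfold Spec_dem
  rcases eq_or_lt_of_le hpre with h0 | hpos
  · subst h0; decide
  · have hn : n = ((n.toNat : Nat) : Int) := by omega
    set N := n.toNat with hN
    have hNpos : 0 < N := by omega
    rw [hn, lemA N hNpos]
    unfold dem_alt
    rw [if_neg (by omega), Int.toNat_natCast]
    rw [lemDC (oddPartRec N) (lemOP_pos N hNpos), lemOP N hNpos]
    have := lemBij N hNpos
    omega
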